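-- pv_equiv track=rewrite | github.com/karu9/adventcalendar3 | src/day21/day21.py | get_flips_and_rotations
-- ===== SOURCE A (Python) =====
-- def get_flips_and_rotations(rule):
--     result = []
--     result.append(rule)
--     ## rotations ##
--     len_rule = len(rule)
--     result.append([''.join([result[-1][x][k] for x in range(0,len_rule)]) for k in range(len_rule-1,-1,-1)])
--     result.append([''.join([result[-1][x][k] for x in range(0,len_rule)]) for k in range(len_rule-1,-1,-1)])
--     result.append([''.join([result[-1][x][k] for x in range(0,len_rule)]) for k in range(len_rule-1,-1,-1)])
--     ## flips ##
--     result.append(rule[::-1])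
--     result.append([''.join([result[-1][x][k] for x in range(0,len_rule)]) for k in range(len_rule-1,-1,-1)])
--     result.append([''.join([result[-1][x][k] for x in range(0,len_rule)]) for k in range(len_rule-1,-1,-1)])
--     result.append([''.join([result[-1][x][k] for x in range(0,len_rule)]) for k in range(len_rule-1,-1,-1)])
--     return result
-- ===== SOURCE B (Python) =====
-- def get_flips_and_rotations(rule):
--     n = len(rule)
--
--     def grid(cell):
--         return [''.join(cell(i, j) for j in range(n)) for i in range(n)]
--
--     return [
--         rule,
--         grid(lambda i, j: rule[j][n - 1 - i]),
--         grid(lambda i, j: rule[n - 1 - i][n - 1 - j]),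
--         grid(lambda i, j: rule[n - 1 - j][i]),
--         rule[::-1],
--         grid(lambda i, j: rule[n - 1 - j][n - 1 - i]),
--         grid(lambda i, j: rule[i][n - 1 - j]),
--         grid(lambda i, j: rule[j][i]),
--     ]
-- ===== Notes on version B (the rewrite author's own statement) =====
-- stated objective: alternative
-- what changed: B computes each of the 8 dihedral symmetries by a closed-form index map (i,j) -> cell of the original rule, instead of A's chaining each rotation off result[-1].
import Mathlib
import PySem

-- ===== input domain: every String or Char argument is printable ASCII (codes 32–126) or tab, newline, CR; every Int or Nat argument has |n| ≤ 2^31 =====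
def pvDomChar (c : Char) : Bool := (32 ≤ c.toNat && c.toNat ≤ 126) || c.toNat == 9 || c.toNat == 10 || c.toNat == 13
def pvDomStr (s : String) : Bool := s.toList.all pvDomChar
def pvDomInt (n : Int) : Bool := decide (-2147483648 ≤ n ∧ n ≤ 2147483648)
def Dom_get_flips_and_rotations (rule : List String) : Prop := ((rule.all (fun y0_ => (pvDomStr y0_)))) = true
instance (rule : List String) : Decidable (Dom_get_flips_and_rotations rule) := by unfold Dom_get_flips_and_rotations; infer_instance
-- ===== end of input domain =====

-- ===== PORT A =====
-- B changes the decomposition only (closed-form dihedral index maps instead of chained rotations); same cost.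
-- A's repeated comprehension: ''.join of the single chars result[-1][x][k] is String.ofList of that char list
-- (exact: PySem.Chars.join_nil_singletons).
def pvRotA (prev : List String) (n : Int) : List String :=
  (PySem.List.pyRange (n - 1) (-1) (-1)).map (fun k =>
    String.ofList ((PySem.List.pyRange 0 n 1).map (fun x =>
      PySem.List.pyGetD (PySem.List.pyGetD prev x "").toList k ' ')))

-- rule[::-1] is List.reverse (exact: PySem.List.slice?_none_none_neg_one).
def get_flips_and_rotations (rule : List String) : List (List String) :=
  let result : List (List String) := []
  let result := result ++ [rule]
  let len_rule : Int := rule.length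
  let result := result ++ [pvRotA (PySem.List.pyGetD result (-1) []) len_rule]
  let result := result ++ [pvRotA (PySem.List.pyGetD result (-1) []) len_rule]
  let result := result ++ [pvRotA (PySem.List.pyGetD result (-1) []) len_rule]
  let result := result ++ [rule.reverse]
  let result := result ++ [pvRotA (PySem.List.pyGetD result (-1) []) len_rule]
  let result := result ++ [pvRotA (PySem.List.pyGetD result (-1) []) len_rule]
  let result := result ++ [pvRotA (PySem.List.pyGetD result (-1) []) len_rule]
  result

-- ===== PORT B =====
def pvCell (rule : List String) (i j : Nat) : Char :=
  ((rule.getD i "").toList).getD j ' '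

def pvMkGrid (n : Nat) (cell : Nat → Nat → Char) : List String :=
  (List.range n).map (fun i => String.ofList ((List.range n).map (fun j => cell i j)))

def get_flips_and_rotations_alt (rule : List String) : List (List String) :=
  let n := rule.length
  [ rule,
    pvMkGrid n (fun i j => pvCell rule j (n - 1 - i)),
    pvMkGrid n (fun i j => pvCell rule (n - 1 - i) (n - 1 - j)),
    pvMkGrid n (fun i j => pvCell rule (n - 1 - j) i),
    rule.reverse,
    pvMkGrid n (fun i j => pvCell rule (n - 1 - j) (n - 1 - i)),
    pvMkGrid n (fun i j => pvCell rule i (n - 1 - j)),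
    pvMkGrid n (fun i j => pvCell rule j i) ]

-- ===== PRECONDITION & SPEC =====
-- Pre_: every row has at least len(rule) characters; on shorter rows both Pythons raise IndexError.
def Pre_get_flips_and_rotations (rule : List String) : Prop :=
  ∀ s ∈ rule, rule.length ≤ s.toList.length

instance (rule : List String) : Decidable (Pre_get_flips_and_rotations rule) := by
  unfold Pre_get_flips_and_rotations; infer_instance

def pvWitness_get_flips_and_rotations : List String := [".#", ".."]

def Spec_get_flips_and_rotations (rule : List String) (out : List (List String)) : Prop := out = get_flips_and_rotations_alt rule
instance (rule : List String) (out : List (List String)) : Decidable (Spec_get_flips_and_rotations rule out) := by unfold Spec_get_flips_and_rotations; infer_instance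

-- ===== CLAIM (what is proved, stated in full; the proofs are below) =====
def Claim_equal_get_flips_and_rotations : Prop := ∀ (rule : List String), Dom_get_flips_and_rotations rule → Pre_get_flips_and_rotations rule → Spec_get_flips_and_rotations rule (get_flips_and_rotations rule)

-- ===== LEMMAS AND PROOFS =====
theorem pvMkGrid_congr (n : Nat) (f g : Nat → Nat → Char)
    (h : ∀ i j, i < n → j < n → f i j = g i j) : pvMkGrid n f = pvMkGrid n g := by
  unfold pvMkGrid
  refine List.map_congr_left (fun i hi => ?_)
  rw [List.mem_range] at hi
  congr 1
  refine List.map_congr_left (fun j hj => ?_)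
  rw [List.mem_range] at hj
  exact h i j hi hj

theorem pvCell_mkGrid (n : Nat) (f : Nat → Nat → Char) (i j : Nat)
    (hi : i < n) (hj : j < n) : pvCell (pvMkGrid n f) i j = f i j := by
  unfold pvCell pvMkGrid
  simp [List.getD_eq_getElem?_getD, hi, hj]

theorem pvCell_reverse (rule : List String) (i j : Nat) (hi : i < rule.length) :
    pvCell rule.reverse i j = pvCell rule (rule.length - 1 - i) j := by
  unfold pvCell
  rw [List.getD_eq_getElem?_getD, List.getD_eq_getElem?_getD,
      List.getElem?_reverse (by simpa using hi)]
  simp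

theorem pvRotA_eq (g : List String) (n : Nat) :
    pvRotA g (n : Int) = pvMkGrid n (fun i j => pvCell g j (n - 1 - i)) := by
  unfold pvRotA pvMkGrid
  rw [PySem.List.pyRange_neg_one]
  have hlen : ((n : Int) - 1 - (-1)).toNat = n := by omega
  rw [hlen, List.map_map]
  refine List.map_congr_left (fun i hi => ?_)
  rw [List.mem_range] at hi
  have hk : (n : Int) - 1 - (i : Int) = ((n - 1 - i : Nat) : Int) := by omega
  simp only [Function.comp, hk]
  congr 1
  rw [PySem.List.pyRange_zero_natCast, List.map_map]
  refine List.map_congr_left (fun x hx => ?_)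
  simp [pvCell]

theorem get_flips_and_rotations_spec' (rule : List String) :
    get_flips_and_rotations rule = get_flips_and_rotations_alt rule := by
  unfold get_flips_and_rotations get_flips_and_rotations_alt
  have h1 : PySem.List.pyGetD [rule] (-1) ([] : List String) = rule := by
    simp [PySem.List.pyGetD, PySem.List.pyGet?, PySem.List.pyIdx?]
  simp only [List.nil_append, PySem.List.pyGetD_neg_one_append_singleton, h1]
  rw [pvRotA_eq rule rule.length]
  rw [pvRotA_eq, pvRotA_eq, pvRotA_eq rule.reverse, pvRotA_eq, pvRotA_eq]
  simp only [List.cons_append, List.nil_append]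
  rw [pvMkGrid_congr rule.length
        (fun i j => pvCell (pvMkGrid rule.length fun i j => pvCell rule j (rule.length - 1 - i)) j (rule.length - 1 - i))
        (fun i j => pvCell rule (rule.length - 1 - i) (rule.length - 1 - j))
        (fun i j hi hj => by
          beta_reduce
          rw [pvCell_mkGrid _ _ _ _ hj (by omega)])]
  rw [pvMkGrid_congr rule.length
        (fun i j => pvCell (pvMkGrid rule.length fun i j => pvCell rule (rule.length - 1 - i) (rule.length - 1 - j)) j (rule.length - 1 - i))
        (fun i j => pvCell rule (rule.length - 1 - j) i)
        (fun i j hi hj => by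
          beta_reduce
          rw [pvCell_mkGrid _ _ _ _ hj (by omega)]
          (congr 1; omega))]
  rw [pvMkGrid_congr rule.length
        (fun i j => pvCell rule.reverse j (rule.length - 1 - i))
        (fun i j => pvCell rule (rule.length - 1 - j) (rule.length - 1 - i))
        (fun i j hi hj => pvCell_reverse rule j _ hj)]
  rw [pvMkGrid_congr rule.length
        (fun i j => pvCell (pvMkGrid rule.length fun i j => pvCell rule (rule.length - 1 - j) (rule.length - 1 - i)) j (rule.length - 1 - i))
        (fun i j => pvCell rule i (rule.length - 1 - j))
        (fun i j hi hj => by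
          beta_reduce
          rw [pvCell_mkGrid _ _ _ _ hj (by omega)]
          (congr 1; omega))]
  rw [pvMkGrid_congr rule.length
        (fun i j => pvCell (pvMkGrid rule.length fun i j => pvCell rule i (rule.length - 1 - j)) j (rule.length - 1 - i))
        (fun i j => pvCell rule j i)
        (fun i j hi hj => by
          beta_reduce
          rw [pvCell_mkGrid _ _ _ _ hj (by omega)]
          (congr 1; omega))]

-- ===== VERDICT (by name: the statement is the Claim_ definition above) =====
theorem get_flips_and_rotations_spec : Claim_equal_get_flips_and_rotations := by
  intro rule _ _
  unfold Spec_get_flips_and_rotations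
  exact get_flips_and_rotations_spec' rule
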